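-- pv_equiv track=rewrite | github.com/incubo4u/algorithm | daily-challenge-leetcode/Minimum_Amount_of_Time_to_Collect_Garbage/Solution.py | garbageCollection
-- ===== SOURCE A (Python) =====
-- def garbageCollection(garbage: list[str], travel: list[int]) -> int:
--     M = P = G = 0
--     for i, g in enumerate(garbage):
--         if 'M' in g: M = i
--         if 'P' in g: P = i
--         if 'G' in g: G = i
--     n = len(garbage)
--     cost = 0
--     for i in range(n):
--         if i < M: cost += travel[i]
--         if i < P: cost += travel[i]
--         if i < G: cost += travel[i]
--         cost += len(garbage[i])
--     return cost
-- ===== SOURCE B (Python) =====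
-- def garbageCollection(garbage: list[str], travel: list[int]) -> int:
--     total = sum(len(g) for g in garbage)
--     for j in range(len(garbage) - 1):
--         ahead = sum(any(c in g for g in garbage[j + 1:]) for c in 'MPG')
--         if ahead:
--             total += ahead * travel[j]
--     return total
-- ===== Notes on version B (the rewrite author's own statement) =====
-- stated objective: alternative
-- what changed: B drops A's last-index bookkeeping entirely: for each road j it directly counts how many of the three types occur anywhere in the suffix garbage[j+1:] and adds that count times travel[j], instead of precomputing last indices and comparing i < last per type.
import Mathlib
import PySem

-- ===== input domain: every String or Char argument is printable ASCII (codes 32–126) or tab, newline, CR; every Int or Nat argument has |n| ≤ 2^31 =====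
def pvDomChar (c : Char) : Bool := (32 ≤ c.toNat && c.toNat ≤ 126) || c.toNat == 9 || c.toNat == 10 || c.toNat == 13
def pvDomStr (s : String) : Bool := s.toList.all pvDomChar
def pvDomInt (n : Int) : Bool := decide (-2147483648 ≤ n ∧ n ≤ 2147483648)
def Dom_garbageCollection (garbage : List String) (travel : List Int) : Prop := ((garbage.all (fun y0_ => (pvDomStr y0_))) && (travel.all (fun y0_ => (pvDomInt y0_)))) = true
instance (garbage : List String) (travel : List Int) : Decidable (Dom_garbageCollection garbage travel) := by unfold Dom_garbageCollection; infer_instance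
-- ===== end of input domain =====

-- B removes A's last-index bookkeeping: for each road it directly counts the types that
-- still occur in the remaining suffix of houses (alternative decomposition, not faster).
-- ===== PORT A =====
def garbageCollection (garbage : List String) (travel : List Int) : Int :=
  -- the three ifs update independent components of (M, P, G)
  let s := (PySem.List.enumerate garbage 0).foldl
    (fun (s : Int × Int × Int) p =>
      (if PySem.Str.isIn "M" p.2 then p.1 else s.1,
       if PySem.Str.isIn "P" p.2 then p.1 else s.2.1,
       if PySem.Str.isIn "G" p.2 then p.1 else s.2.2))
    (0, 0, 0)
  let M := s.1
  let P := s.2.1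
  let G := s.2.2
  let n : Int := garbage.length
  (PySem.List.pyRange 0 n 1).foldl
    (fun cost i =>
      let cost := if i < M then cost + PySem.List.pyGetD travel i 0 else cost
      let cost := if i < P then cost + PySem.List.pyGetD travel i 0 else cost
      let cost := if i < G then cost + PySem.List.pyGetD travel i 0 else cost
      cost + PySem.Str.len (PySem.List.pyGetD garbage i ""))
    0

-- ===== PORT B =====
def garbageCollection_alt (garbage : List String) (travel : List Int) : Int :=
  (PySem.List.pyRange 0 ((garbage.length : Int) - 1) 1).foldl
    (fun total j =>
      let ahead : Int :=
        ((["M", "P", "G"] : List String).map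
          (fun c => if (PySem.List.slice garbage (some (j + 1)) none).any
              (fun g => PySem.Str.isIn c g) then (1 : Int) else 0)).sum
      if ahead ≠ 0 then total + ahead * PySem.List.pyGetD travel j 0 else total)
    ((garbage.map PySem.Str.len).sum)

-- ===== PRECONDITION & SPEC =====
-- Pre_ excludes exactly the inputs where A raises IndexError: a house containing one of
-- 'M'/'P'/'G' at an index beyond len(travel) makes A read travel past its end.
def Pre_garbageCollection (garbage : List String) (travel : List Int) : Prop :=
  ∀ p ∈ PySem.List.enumerate garbage 0,
    (PySem.Str.isIn "M" p.2 = true ∨ PySem.Str.isIn "P" p.2 = true ∨ PySem.Str.isIn "G" p.2 = true) →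
      p.1 ≤ (travel.length : Int)
instance (garbage : List String) (travel : List Int) : Decidable (Pre_garbageCollection garbage travel) := by unfold Pre_garbageCollection; infer_instance

def pvWitness_garbageCollection : List String × List Int := (["MP", "G"], [3])

def Spec_garbageCollection (garbage : List String) (travel : List Int) (out : Int) : Prop := out = garbageCollection_alt garbage travel
instance (garbage : List String) (travel : List Int) (out : Int) : Decidable (Spec_garbageCollection garbage travel out) := by unfold Spec_garbageCollection; infer_instance

-- ===== CLAIM (what is proved, stated in full; the proofs are below) =====
def Claim_equal_garbageCollection : Prop := ∀ (garbage : List String) (travel : List Int), Dom_garbageCollection garbage travel → Pre_garbageCollection garbage travel → Spec_garbageCollection garbage travel (garbageCollection garbage travel)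

-- ===== LEMMAS AND PROOFS =====

-- last house index containing c (0 if absent): what A's first loop computes per type
def lastHouse (c : String) (garbage : List String) : Int :=
  (PySem.List.enumerate garbage 0).foldl
    (fun last p => if PySem.Str.isIn c p.2 then p.1 else last) 0

lemma foldl_last_le (c : String) (l : List (Int × String)) (init j : Int)
    (h0 : init ≤ j) (h : ∀ p ∈ l, p.1 ≤ j) :
    l.foldl (fun last p => if PySem.Str.isIn c p.2 then p.1 else last) init ≤ j := by
  induction l generalizing init with
  | nil => exact h0
  | cons x t ih =>
    simp only [List.foldl_cons]
    apply ih
    · by_cases hc : PySem.Str.isIn c x.2 = true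
      · rw [if_pos hc]; exact h x List.mem_cons_self
      · rw [if_neg hc]; exact h0
    · intro p hp; exact h p (List.mem_cons_of_mem _ hp)

lemma foldl_last_gt_iff (c : String) (gs : List String) (k init j : Int) (hk : j < k) :
    (j < (PySem.List.enumerate gs k).foldl
        (fun last p => if PySem.Str.isIn c p.2 then p.1 else last) init) ↔
      (j < init ∨ gs.any (fun g => PySem.Str.isIn c g) = true) := by
  induction gs generalizing k init with
  | nil => simp [PySem.List.enumerate_nil]
  | cons g t ih =>
    rw [PySem.List.enumerate_cons, List.foldl_cons]
    rw [ih (k + 1) _ (by omega)]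
    by_cases hc : PySem.Str.isIn c g = true
    · rw [if_pos hc]
      simp only [List.any_cons, hc, Bool.true_or]
      exact iff_of_true (Or.inl hk) (Or.inr (by simp))
    · rw [if_neg hc]
      simp only [Bool.not_eq_true] at hc
      simp only [List.any_cons, hc, Bool.false_or]

-- A's "i < last index of c" is exactly "some house after i contains c"
lemma lt_lastHouse_iff (c : String) (gs : List String) (j : Int) (hj : 0 ≤ j) :
    (j < lastHouse c gs) ↔
      ((gs.drop (j + 1).toNat).any (fun g => PySem.Str.isIn c g) = true) := by
  unfold lastHouse
  set m := (j + 1).toNat with hm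
  conv_lhs => rw [← List.take_append_drop m gs]
  rw [PySem.List.enumerate_append, List.foldl_append]
  have hinit : (PySem.List.enumerate (gs.take m) 0).foldl
      (fun last p => if PySem.Str.isIn c p.2 then p.1 else last) 0 ≤ j := by
    apply foldl_last_le
    · exact hj
    · intro p hp
      rcases (PySem.List.mem_enumerate_iff _ _ _).mp hp with ⟨k, hk, rfl⟩
      rw [List.length_take] at hk
      simp only [zero_add]
      omega
  by_cases hle : m ≤ gs.length
  · have hlen : (gs.take m).length = m := by rw [List.length_take]; omega
    rw [hlen]
    rw [foldl_last_gt_iff c (gs.drop m) (0 + (m : Int))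
        ((PySem.List.enumerate (gs.take m) 0).foldl
          (fun last p => if PySem.Str.isIn c p.2 then p.1 else last) 0) j (by omega)]
    have : ¬ j < (PySem.List.enumerate (gs.take m) 0).foldl
        (fun last p => if PySem.Str.isIn c p.2 then p.1 else last) 0 := not_lt.mpr hinit
    tauto
  · have hdrop : gs.drop m = [] := List.drop_eq_nil_of_le (by omega)
    rw [hdrop]
    simp only [PySem.List.enumerate_nil, List.foldl_nil, List.any_nil]
    exact iff_of_false (not_lt.mpr hinit) (by simp)

lemma lastHouse_lt_len (c : String) (garbage : List String) (h : garbage ≠ []) :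
    lastHouse c garbage < (garbage.length : Int) := by
  have h0 : 0 < garbage.length := List.length_pos_iff.mpr h
  by_contra hge
  rw [not_lt] at hge
  have := lt_lastHouse_iff c garbage ((garbage.length : Int) - 1) (by omega)
  have hlt : ((garbage.length : Int) - 1) < lastHouse c garbage := by omega
  rw [this] at hlt
  have : ((garbage.length : Int) - 1 + 1).toNat = garbage.length := by omega
  rw [this, List.drop_length] at hlt
  simp at hlt

-- the per-road identity: three conditional travel adds = (count of types ahead) * travel
lemma per_edge (garbage : List String) (travel : List Int) (i : Int) (h0 : 0 ≤ i) :
    (if i < lastHouse "M" garbage then PySem.List.pyGetD travel i 0 else 0) +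
      (if i < lastHouse "P" garbage then PySem.List.pyGetD travel i 0 else 0) +
      (if i < lastHouse "G" garbage then PySem.List.pyGetD travel i 0 else 0)
    = ((if (PySem.List.slice garbage (some (i + 1)) none).any
            (fun g => PySem.Str.isIn "M" g) then (1 : Int) else 0) +
       ((if (PySem.List.slice garbage (some (i + 1)) none).any
            (fun g => PySem.Str.isIn "P" g) then (1 : Int) else 0) +
        ((if (PySem.List.slice garbage (some (i + 1)) none).any
            (fun g => PySem.Str.isIn "G" g) then (1 : Int) else 0) + 0)))
      * PySem.List.pyGetD travel i 0 := by
  rw [PySem.List.slice_from garbage (by omega : (0 : Int) ≤ i + 1)]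
  simp only [lt_lastHouse_iff _ _ _ h0]
  split_ifs <;> ring

-- ===== VERDICT (by name: the statement is the Claim_ definition above) =====
theorem garbageCollection_spec : Claim_equal_garbageCollection := by
  intro garbage travel _hdom _hpre
  unfold Spec_garbageCollection garbageCollection garbageCollection_alt
  rw [PySem.List.foldl_prod_mk
    (f := fun s (p : Int × String) => if PySem.Str.isIn "M" p.2 then p.1 else s)
    (g := fun (s : Int × Int) (p : Int × String) =>
      (if PySem.Str.isIn "P" p.2 then p.1 else s.1,
       if PySem.Str.isIn "G" p.2 then p.1 else s.2))]
  rw [PySem.List.foldl_prod_mk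
    (f := fun s (p : Int × String) => if PySem.Str.isIn "P" p.2 then p.1 else s)
    (g := fun s (p : Int × String) => if PySem.Str.isIn "G" p.2 then p.1 else s)]
  simp only []
  by_cases hnil : garbage = []
  · subst hnil
    simp only [List.length_nil, Nat.cast_zero]
    rw [PySem.List.pyRange_one_eq_nil (le_refl (0 : Int)),
        PySem.List.pyRange_one_eq_nil (by norm_num : (0 : Int) - 1 ≤ 0)]
    rfl
  · have hM : List.foldl (fun (s : Int) (p : Int × String) =>
        if PySem.Str.isIn "M" p.2 then p.1 else s) 0 (PySem.List.enumerate garbage 0)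
        = lastHouse "M" garbage := rfl
    have hP : List.foldl (fun (s : Int) (p : Int × String) =>
        if PySem.Str.isIn "P" p.2 then p.1 else s) 0 (PySem.List.enumerate garbage 0)
        = lastHouse "P" garbage := rfl
    have hG : List.foldl (fun (s : Int) (p : Int × String) =>
        if PySem.Str.isIn "G" p.2 then p.1 else s) 0 (PySem.List.enumerate garbage 0)
        = lastHouse "G" garbage := rfl
    rw [hM, hP, hG]
    -- A's cost loop in additive form
    rw [PySem.List.foldl_congr_mem _ _
      (fun (cost i : Int) => cost +
        (((if i < lastHouse "M" garbage then PySem.List.pyGetD travel i 0 else 0) +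
          (if i < lastHouse "P" garbage then PySem.List.pyGetD travel i 0 else 0) +
          (if i < lastHouse "G" garbage then PySem.List.pyGetD travel i 0 else 0)) +
         PySem.Str.len (PySem.List.pyGetD garbage i ""))) 0
      (by intro acc i _
          simp only []
          split_ifs <;> ring)]
    rw [PySem.List.foldl_add, zero_add, PySem.List.sum_map_add_int]
    -- B's loop in additive form
    rw [PySem.List.foldl_congr_mem _ _
      (fun (total j : Int) => total +
        ((if (PySem.List.slice garbage (some (j + 1)) none).any
              (fun g => PySem.Str.isIn "M" g) then (1 : Int) else 0) +
         ((if (PySem.List.slice garbage (some (j + 1)) none).any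
              (fun g => PySem.Str.isIn "P" g) then (1 : Int) else 0) +
          ((if (PySem.List.slice garbage (some (j + 1)) none).any
              (fun g => PySem.Str.isIn "G" g) then (1 : Int) else 0) + 0)))
          * PySem.List.pyGetD travel j 0) _
      (by intro acc j _
          simp only [List.map_cons, List.map_nil, List.sum_cons, List.sum_nil]
          split_ifs <;> first | rfl | omega)]
    rw [PySem.List.foldl_add]
    -- the garbage-length part
    have hlen : (PySem.List.pyRange 0 (garbage.length : Int)).map
        (fun i => PySem.Str.len (PySem.List.pyGetD garbage i ""))
        = garbage.map PySem.Str.len := by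
      conv_rhs => rw [← PySem.List.map_pyGetD_pyRange_zero' garbage ""]
      rw [List.map_map]
      rfl
    rw [hlen]
    -- split off the last index of A's ite-sum; its three conditions are all false
    rw [PySem.List.pyRange_one_append 0 ((garbage.length : Int) - 1) (garbage.length : Int)
          (by have := List.length_pos_iff.mpr hnil; omega) (by omega),
        PySem.List.pyRange_one_cons
          (by omega : (garbage.length : Int) - 1 < (garbage.length : Int)),
        show ((garbage.length : Int) - 1 + 1) = (garbage.length : Int) from by ring,
        PySem.List.pyRange_one_eq_nil (le_refl ((garbage.length : Int)))]
    rw [List.map_append, List.sum_append]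
    have hMf : ¬ ((garbage.length : Int) - 1 < lastHouse "M" garbage) := by
      have := lastHouse_lt_len "M" garbage hnil; omega
    have hPf : ¬ ((garbage.length : Int) - 1 < lastHouse "P" garbage) := by
      have := lastHouse_lt_len "P" garbage hnil; omega
    have hGf : ¬ ((garbage.length : Int) - 1 < lastHouse "G" garbage) := by
      have := lastHouse_lt_len "G" garbage hnil; omega
    simp only [List.map_cons, List.map_nil, List.sum_cons, List.sum_nil,
      if_neg hMf, if_neg hPf, if_neg hGf]
    -- termwise equality on the common range
    have hmap : List.map
        (fun i => ((if i < lastHouse "M" garbage then PySem.List.pyGetD travel i 0 else 0) +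
            if i < lastHouse "P" garbage then PySem.List.pyGetD travel i 0 else 0) +
            if i < lastHouse "G" garbage then PySem.List.pyGetD travel i 0 else 0)
        (PySem.List.pyRange 0 ((garbage.length : Int) - 1) 1)
      = List.map
        (fun j => ((if ((PySem.List.slice garbage (some (j + 1)) none).any
              fun g => PySem.Str.isIn "M" g) = true then (1 : Int) else 0) +
            ((if ((PySem.List.slice garbage (some (j + 1)) none).any
              fun g => PySem.Str.isIn "P" g) = true then (1 : Int) else 0) +
             ((if ((PySem.List.slice garbage (some (j + 1)) none).any
              fun g => PySem.Str.isIn "G" g) = true then (1 : Int) else 0) + 0))) *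
            PySem.List.pyGetD travel j 0)
        (PySem.List.pyRange 0 ((garbage.length : Int) - 1) 1) := by
      apply List.map_congr_left
      intro i hi
      rw [PySem.List.mem_pyRange_one] at hi
      exact per_edge garbage travel i hi.1
    rw [hmap]
    ring
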